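-- pv_equiv track=rewrite | github.com/fogonthedowns/helppetai-website | backend/src/services/phone/scheduling_service.py | _looks_like_gibberish
-- ===== SOURCE A (Python) =====
-- def _looks_like_gibberish(word: str) -> bool:
--     """
--     Check if a word looks like gibberish/random characters
--
--     This is a simple heuristic that looks for patterns that are uncommon in English:
--     - Too many consecutive consonants
--     - Unusual character patterns
--     """
--     word = word.lower()
--
--     # Very short words are probably not gibberish
--     if len(word) < 3:
--         return False
--
--     # Check for too many consecutive consonants (more than 3 is unusual in English)
--     consonants = 'bcdfghjklmnpqrstvwxyz'
--     consecutive_consonants = 0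
--     max_consecutive_consonants = 0
--
--     for char in word:
--         if char in consonants:
--             consecutive_consonants += 1
--             max_consecutive_consonants = max(max_consecutive_consonants, consecutive_consonants)
--         else:
--             consecutive_consonants = 0
--
--     # If more than 3 consecutive consonants, likely gibberish
--     if max_consecutive_consonants > 3:
--         return True
--
--     # Check for unusual patterns like "xyz", "qzx", etc.
--     unusual_sequences = ['xyz', 'qzx', 'zxc', 'qwerty', 'asdf', 'zzzz']
--     for seq in unusual_sequences:
--         if seq in word:
--             return True
--
--     return False
-- ===== SOURCE B (Python) =====
-- _CONSONANTS = 'bcdfghjklmnpqrstvwxyz'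
-- _UNUSUAL_SEQUENCES = ('xyz', 'qzx', 'zxc', 'qwerty', 'asdf', 'zzzz')
--
--
-- def _consonant_runs(w):
--     """Lengths of the maximal consonant runs of w, left to right."""
--     runs = []
--     i = 0
--     n = len(w)
--     while i < n:
--         if w[i] in _CONSONANTS:
--             j = i + 1
--             while j < n and w[j] in _CONSONANTS:
--                 j += 1
--             runs.append(j - i)
--             i = j
--         else:
--             i += 1
--     return runs
--
--
-- def _looks_like_gibberish(word: str) -> bool:
--     word = word.lower()
--     if len(word) < 3:
--         return False
--     # Materialize all maximal consonant runs, then reduce over that table.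
--     if any(r > 3 for r in _consonant_runs(word)):
--         return True
--     return any(seq in word for seq in _UNUSUAL_SEQUENCES)
-- ===== Notes on version B (the rewrite author's own statement) =====
-- stated objective: alternative
-- what changed: Replaces the running consecutive-consonant counter and running maximum with a helper that first materializes the list of maximal consonant-run lengths and then a separate any(r > 3) reduction over that table; the fixed-sequence check becomes a single any() over the tuple of sequences.
import Mathlib
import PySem

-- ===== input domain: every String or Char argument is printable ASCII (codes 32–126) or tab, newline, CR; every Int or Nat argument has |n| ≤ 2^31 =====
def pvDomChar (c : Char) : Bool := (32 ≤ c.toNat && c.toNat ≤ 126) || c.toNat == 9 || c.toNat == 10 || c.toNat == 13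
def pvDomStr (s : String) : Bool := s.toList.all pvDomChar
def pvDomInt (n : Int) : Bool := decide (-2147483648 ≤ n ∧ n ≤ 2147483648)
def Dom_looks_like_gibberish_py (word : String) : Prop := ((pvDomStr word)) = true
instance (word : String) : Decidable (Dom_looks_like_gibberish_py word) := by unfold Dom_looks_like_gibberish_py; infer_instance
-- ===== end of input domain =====

-- B replaces A's running consecutive-consonant counter by materializing the list of
-- maximal consonant-run lengths and reducing over that table (objective: alternative).

-- shared constants of both Pythons
def pvConsonants : List Char := "bcdfghjklmnpqrstvwxyz".toList

def pvUnusualSeqs : List String := ["xyz", "qzx", "zxc", "qwerty", "asdf", "zzzz"]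

-- ===== PORT A =====
-- A's loop body: running counter and running maximum over the characters
def pvStepA (st : Nat × Nat) (c : Char) : Nat × Nat :=
  if pvConsonants.contains c then (st.1 + 1, max st.2 (st.1 + 1)) else (0, st.2)

def looks_like_gibberish_py (word : String) : Bool :=
  let w := PySem.Str.lower word
  if PySem.Str.len w < 3 then false
  else
    let mx := (w.toList.foldl pvStepA (0, 0)).2
    if mx > 3 then true
    else pvUnusualSeqs.any (fun seq => PySem.Str.isIn seq w)

-- ===== PORT B =====
-- Source B's helper _consonant_runs: lengths of the maximal consonant runs, left to right
def pvRunsB (l : List Char) : List Nat :=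
  match l with
  | [] => []
  | c :: t =>
    if pvConsonants.contains c then
      (1 + (t.takeWhile (fun d => pvConsonants.contains d)).length)
        :: pvRunsB (t.dropWhile (fun d => pvConsonants.contains d))
    else pvRunsB t
termination_by l.length
decreasing_by
  all_goals simp only [List.length_cons]
  · have := List.length_dropWhile_le (fun d => pvConsonants.contains d) t
    omega
  · omega

def looks_like_gibberish_py_alt (word : String) : Bool :=
  let w := PySem.Str.lower word
  if PySem.Str.len w < 3 then false
  else
    if (pvRunsB w.toList).any (fun r => r > 3) then true
    else pvUnusualSeqs.any (fun seq => PySem.Str.isIn seq w)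

-- ===== PRECONDITION & SPEC =====
def Spec_looks_like_gibberish_py (word : String) (out : Bool) : Prop := out = looks_like_gibberish_py_alt word
instance (word : String) (out : Bool) : Decidable (Spec_looks_like_gibberish_py word out) := by unfold Spec_looks_like_gibberish_py; infer_instance

-- ===== CLAIM (what is proved, stated in full; the proofs are below) =====
def Claim_equal_looks_like_gibberish_py : Prop := ∀ (word : String), Dom_looks_like_gibberish_py word → Spec_looks_like_gibberish_py word (looks_like_gibberish_py word)

-- ===== LEMMAS AND PROOFS =====

-- consuming a block of consonants advances the counter by its length and updates the max once
theorem pv_fold_run (r : List Char) (hr : ∀ c ∈ r, pvConsonants.contains c = true) :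
    ∀ (rest : List Char) (cur mx : Nat), cur ≤ mx →
      List.foldl pvStepA (cur, mx) (r ++ rest)
        = List.foldl pvStepA (cur + r.length, max mx (cur + r.length)) rest := by
  induction r with
  | nil =>
    intro rest cur mx h
    simp [Nat.max_eq_left h]
  | cons c r ih =>
    intro rest cur mx h
    have hc : pvConsonants.contains c = true := hr c (by simp)
    have hrec := ih (fun d hd => hr d (by simp [hd])) rest (cur + 1) (max mx (cur + 1)) (by omega)
    simp only [List.cons_append, List.foldl_cons, pvStepA, hc, if_pos]
    rw [hrec]
    have h2 : max (max mx (cur + 1)) (cur + 1 + r.length) = max mx (cur + (r.length + 1)) := by omega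
    have h1 : cur + 1 + r.length = cur + (r.length + 1) := by omega
    rw [h2, h1]
    simp

-- dropWhile's result is empty or starts with an element failing the predicate
theorem pv_dropWhile_cases {α : Type} (p : α → Bool) (l : List α) :
    List.dropWhile p l = [] ∨
      ∃ d rest, List.dropWhile p l = d :: rest ∧ p d = false := by
  induction l with
  | nil => left; rfl
  | cons a l ih =>
    by_cases h : p a
    · simpa [List.dropWhile, h] using ih
    · right; exact ⟨a, l, by simp [List.dropWhile, h], by simp [h]⟩

-- unfolding equations for pvRunsB
theorem pv_runs_nil : pvRunsB [] = [] := by simp only [pvRunsB]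

theorem pv_runs_cons_pos (c : Char) (t : List Char) (hc : pvConsonants.contains c = true) :
    pvRunsB (c :: t)
      = (1 + (t.takeWhile (fun d => pvConsonants.contains d)).length)
          :: pvRunsB (t.dropWhile (fun d => pvConsonants.contains d)) := by
  rw [pvRunsB.eq_def]
  simp only [hc, if_true]

theorem pv_runs_cons_neg (c : Char) (t : List Char) (hc : pvConsonants.contains c = false) :
    pvRunsB (c :: t) = pvRunsB t := by
  rw [pvRunsB.eq_def]
  simp only [hc, Bool.false_eq_true, if_false]

-- A's running maximum equals the max over B's table of run lengths
theorem pv_fold_eq_runs (l : List Char) : ∀ (mx : Nat),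
    (List.foldl pvStepA (0, mx) l).2 = max mx (List.foldr max 0 (pvRunsB l)) := by
  induction l using pvRunsB.induct with
  | case1 => intro mx; simp [pv_runs_nil]
  | case2 c t hc ih =>
    intro mx
    have hall : ∀ d ∈ c :: t.takeWhile (fun d => pvConsonants.contains d),
        pvConsonants.contains d = true := by
      intro d hd
      rcases List.mem_cons.mp hd with h | h
      · subst h; exact hc
      · exact List.mem_takeWhile_imp h
    have hsplit : c :: t
        = (c :: t.takeWhile (fun d => pvConsonants.contains d))
            ++ t.dropWhile (fun d => pvConsonants.contains d) := by
      rw [List.cons_append, List.takeWhile_append_dropWhile]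
    conv_lhs => rw [hsplit]
    rw [pv_fold_run _ hall _ 0 mx (Nat.zero_le _), pv_runs_cons_pos c t hc]
    simp only [List.length_cons, List.foldr_cons, Nat.zero_add]
    set k := (t.takeWhile (fun d => pvConsonants.contains d)).length with hk
    rcases pv_dropWhile_cases (fun d => pvConsonants.contains d) t with hnil | ⟨d, rest, heq, hd⟩
    · rw [hnil]
      simp only [List.foldl_nil, pv_runs_nil, List.foldr_nil]
      omega
    · have hd' : ¬ d ∈ pvConsonants := by simpa using hd
      have hstep : List.foldl pvStepA (k + 1, max mx (k + 1))
          (t.dropWhile (fun d => pvConsonants.contains d))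
            = List.foldl pvStepA (0, max mx (k + 1))
                (t.dropWhile (fun d => pvConsonants.contains d)) := by
        rw [heq]
        simp [pvStepA, hd']
      rw [hstep, ih]
      omega
  | case3 c t hc ih =>
    intro mx
    have hc' : pvConsonants.contains c = false := by
      simpa using hc
    have hc'' : ¬ c ∈ pvConsonants := by simpa using hc'
    rw [pv_runs_cons_neg c t hc']
    simp only [List.foldl_cons, pvStepA]
    simp only [hc', Bool.false_eq_true, if_false]
    exact ih mx

theorem pv_max_gt_iff_any (rs : List Nat) :
    decide (3 < List.foldr max 0 rs) = rs.any (fun r => decide (3 < r)) := by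
  induction rs with
  | nil => simp
  | cons a rs ih =>
    simp only [List.foldr_cons, List.any_cons, ← ih]
    by_cases h : 3 < max a (List.foldr max 0 rs)
    · simp only [h, decide_true]
      have : 3 < a ∨ 3 < List.foldr max 0 rs := by omega
      rcases this with h' | h' <;> simp [h']
    · have h1 : ¬ 3 < a := by omega
      have h2 : ¬ 3 < List.foldr max 0 rs := by omega
      simp [h, h1, h2]

theorem pv_if_true_or (p : Prop) [Decidable p] (b : Bool) :
    (if p then true else b) = (decide p || b) := by
  by_cases h : p <;> simp [h]

-- ===== VERDICT (by name: the statement is the Claim_ definition above) =====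
theorem looks_like_gibberish_py_spec : Claim_equal_looks_like_gibberish_py := by
  intro word _
  unfold Spec_looks_like_gibberish_py looks_like_gibberish_py looks_like_gibberish_py_alt
  simp only []
  by_cases hlen : PySem.Str.len (PySem.Str.lower word) < 3
  · simp only [if_pos hlen]
  · simp only [if_neg hlen]
    rw [pv_if_true_or, pv_if_true_or]
    congr 1
    rw [pv_fold_eq_runs _ 0, Nat.zero_max, pv_max_gt_iff_any]
    rw [Bool.eq_iff_iff]
    simp [List.any_eq_true]
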